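-- pv_equiv track=rewrite | github.com/kprokofiev/RAG-Challenge-2 | src/coverage_ledger.py | _source_status
-- ===== SOURCE A (Python) =====
-- from typing import Any, Dict, List, Optional, Tuple
--
-- _FAILURE_STATUSES = frozenset({
--     "failed", "blocked_paywall", "captcha", "forbidden_403",
--     "rate_limited_429", "requires_login", "robots_denied", "timeout",
-- })
--
-- _INDEXED_STATUSES = frozenset({"indexed", "parsed"})
--
-- def _source_status(docs: List[Dict[str, Any]]) -> str:
--     """Determine source-level status from its documents."""
--     if not docs:
--         return "not_attached"
--     statuses = {d.get("status", "unknown") for d in docs}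
--     if statuses & _INDEXED_STATUSES:
--         return "ok"
--     if statuses & _FAILURE_STATUSES:
--         # Pick most informative failure
--         for s in ["blocked_paywall", "captcha", "forbidden_403", "rate_limited_429",
--                    "requires_login", "robots_denied", "timeout", "failed"]:
--             if s in statuses:
--                 return s
--     if "rendered" in statuses or "created" in statuses:
--         return "in_progress"
--     return "unknown"
-- ===== SOURCE B (Python) =====
-- # One ordered rank table + a single min-pass over docs (no set construction,
-- # no repeated membership scans).
-- _RANK = {
--     "indexed": ("ok", 0), "parsed": ("ok", 0),
--     "blocked_paywall": ("blocked_paywall", 1), "captcha": ("captcha", 2),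
--     "forbidden_403": ("forbidden_403", 3), "rate_limited_429": ("rate_limited_429", 4),
--     "requires_login": ("requires_login", 5), "robots_denied": ("robots_denied", 6),
--     "timeout": ("timeout", 7), "failed": ("failed", 8),
--     "rendered": ("in_progress", 9), "created": ("in_progress", 9),
-- }
--
-- def _source_status(docs):
--     """Determine source-level status from its documents."""
--     if not docs:
--         return "not_attached"
--     best = ("unknown", 10)
--     for d in docs:
--         entry = _RANK.get(d.get("status", "unknown"), ("unknown", 10))
--         if entry[1] < best[1]:
--             best = entry
--     return best[0]
-- ===== Notes on version B (the rewrite author's own statement) =====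
-- stated objective: simpler
-- what changed: Replaces the set construction plus two set-intersection tests and an ordered membership loop by a single status->(label, rank) table and one lowest-rank pass over the documents, returning the kept entry's label.
import Mathlib
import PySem

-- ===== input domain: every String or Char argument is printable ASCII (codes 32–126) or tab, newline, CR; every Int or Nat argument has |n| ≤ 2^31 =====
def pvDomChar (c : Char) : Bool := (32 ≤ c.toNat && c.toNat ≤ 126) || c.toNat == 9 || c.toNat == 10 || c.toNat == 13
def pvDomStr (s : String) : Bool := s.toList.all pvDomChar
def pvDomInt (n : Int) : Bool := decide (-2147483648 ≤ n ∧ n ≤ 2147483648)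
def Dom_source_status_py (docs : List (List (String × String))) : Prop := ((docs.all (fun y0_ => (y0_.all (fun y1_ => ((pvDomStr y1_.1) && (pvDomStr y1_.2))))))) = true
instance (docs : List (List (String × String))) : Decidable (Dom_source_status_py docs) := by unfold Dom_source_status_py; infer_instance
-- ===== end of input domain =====

-- B replaces A's set construction plus repeated membership / ordered-loop scans by one
-- status→(label, rank) table and a single lowest-rank pass over the documents (simpler).

-- ===== PORT A =====
def pvFailOrder : List String :=
  ["blocked_paywall", "captcha", "forbidden_403", "rate_limited_429",
   "requires_login", "robots_denied", "timeout", "failed"]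

def pvIndexedStatuses : PySem.Set String := PySem.Set.ofList ["indexed", "parsed"]

def pvFailureStatuses : PySem.Set String :=
  PySem.Set.ofList ["failed", "blocked_paywall", "captcha", "forbidden_403",
    "rate_limited_429", "requires_login", "robots_denied", "timeout"]

-- statuses = {d.get("status", "unknown") for d in docs}
def pvStatuses (docs : List (List (String × String))) : PySem.Set String :=
  PySem.Set.ofList (docs.map (fun d => (PySem.Dict.mk d).getD "status" "unknown"))

def source_status_py (docs : List (List (String × String))) : String :=
  if docs = [] then "not_attached"
  else
    if PySem.Set.inter (pvStatuses docs) pvIndexedStatuses ≠ [] then "ok"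
    else
      match (if PySem.Set.inter (pvStatuses docs) pvFailureStatuses ≠ [] then
               pvFailOrder.find? (fun s => PySem.Set.contains (pvStatuses docs) s)
             else none) with
      | some s => s
      | none =>
          if PySem.Set.contains (pvStatuses docs) "rendered"
             || PySem.Set.contains (pvStatuses docs) "created"
          then "in_progress" else "unknown"

-- ===== PORT B =====
def pvRankTable : PySem.Dict String (String × Nat) :=
  PySem.Dict.mk
    [("indexed", ("ok", 0)), ("parsed", ("ok", 0)),
     ("blocked_paywall", ("blocked_paywall", 1)), ("captcha", ("captcha", 2)),
     ("forbidden_403", ("forbidden_403", 3)), ("rate_limited_429", ("rate_limited_429", 4)),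
     ("requires_login", ("requires_login", 5)), ("robots_denied", ("robots_denied", 6)),
     ("timeout", ("timeout", 7)), ("failed", ("failed", 8)),
     ("rendered", ("in_progress", 9)), ("created", ("in_progress", 9))]

def source_status_py_alt (docs : List (List (String × String))) : String :=
  if docs = [] then "not_attached"
  else
    (docs.foldl
      (fun (best : String × Nat) d =>
        let entry := pvRankTable.getD ((PySem.Dict.mk d).getD "status" "unknown") ("unknown", 10)
        if entry.2 < best.2 then entry else best)
      ("unknown", 10)).1

-- ===== PRECONDITION & SPEC =====
def Spec_source_status_py (docs : List (List (String × String))) (out : String) : Prop := out = source_status_py_alt docs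
instance (docs : List (List (String × String))) (out : String) : Decidable (Spec_source_status_py docs out) := by unfold Spec_source_status_py; infer_instance

-- ===== CLAIM (what is proved, stated in full; the proofs are below) =====
def Claim_equal_source_status_py : Prop := ∀ (docs : List (List (String × String))), Dom_source_status_py docs → Spec_source_status_py docs (source_status_py docs)

-- ===== LEMMAS AND PROOFS =====

-- the status string of one document, d.get("status", "unknown")
def pvSt (d : List (String × String)) : String := (PySem.Dict.mk d).getD "status" "unknown"

-- B's rank-table lookup as a proof-side function
def pvRankFn (s : String) : String × Nat := pvRankTable.getD s ("unknown", 10)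

def pvLabelOf : Nat → String
  | 0 => "ok"
  | 1 => "blocked_paywall"
  | 2 => "captcha"
  | 3 => "forbidden_403"
  | 4 => "rate_limited_429"
  | 5 => "requires_login"
  | 6 => "robots_denied"
  | 7 => "timeout"
  | 8 => "failed"
  | 9 => "in_progress"
  | _ => "unknown"

-- complete characterisation of the rank-table lookup
lemma pvR_char (s : String) :
    (s = "indexed" ∧ pvRankFn s = ("ok", 0)) ∨
    (s = "parsed" ∧ pvRankFn s = ("ok", 0)) ∨
    (s = "blocked_paywall" ∧ pvRankFn s = ("blocked_paywall", 1)) ∨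
    (s = "captcha" ∧ pvRankFn s = ("captcha", 2)) ∨
    (s = "forbidden_403" ∧ pvRankFn s = ("forbidden_403", 3)) ∨
    (s = "rate_limited_429" ∧ pvRankFn s = ("rate_limited_429", 4)) ∨
    (s = "requires_login" ∧ pvRankFn s = ("requires_login", 5)) ∨
    (s = "robots_denied" ∧ pvRankFn s = ("robots_denied", 6)) ∨
    (s = "timeout" ∧ pvRankFn s = ("timeout", 7)) ∨
    (s = "failed" ∧ pvRankFn s = ("failed", 8)) ∨
    (s = "rendered" ∧ pvRankFn s = ("in_progress", 9)) ∨
    (s = "created" ∧ pvRankFn s = ("in_progress", 9)) ∨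
    pvRankFn s = ("unknown", 10) := by
  have hspec : pvRankFn s = ("unknown", 10) ∨ (s, pvRankFn s) ∈ pvRankTable.items := by
    unfold pvRankFn
    rw [PySem.Dict.getD_eq_get?_getD]
    cases hf : pvRankTable.get? s with
    | none => left; rfl
    | some v =>
        right
        have hm := PySem.Dict.mem_items_of_get?_eq_some pvRankTable hf
        simpa using hm
  rcases hspec with h | h
  · right; right; right; right; right; right; right; right; right; right; right; right
    exact h
  · -- walk the literal items list
    rcases List.mem_cons.mp h with he | h
    · exact Or.inl ⟨congrArg Prod.fst he, congrArg Prod.snd he⟩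
    rcases List.mem_cons.mp h with he | h
    · exact Or.inr (Or.inl ⟨congrArg Prod.fst he, congrArg Prod.snd he⟩)
    rcases List.mem_cons.mp h with he | h
    · exact Or.inr (Or.inr (Or.inl ⟨congrArg Prod.fst he, congrArg Prod.snd he⟩))
    rcases List.mem_cons.mp h with he | h
    · exact Or.inr (Or.inr (Or.inr (Or.inl ⟨congrArg Prod.fst he, congrArg Prod.snd he⟩)))
    rcases List.mem_cons.mp h with he | h
    · exact Or.inr (Or.inr (Or.inr (Or.inr (Or.inl ⟨congrArg Prod.fst he, congrArg Prod.snd he⟩))))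
    rcases List.mem_cons.mp h with he | h
    · exact Or.inr (Or.inr (Or.inr (Or.inr (Or.inr (Or.inl ⟨congrArg Prod.fst he, congrArg Prod.snd he⟩)))))
    rcases List.mem_cons.mp h with he | h
    · exact Or.inr (Or.inr (Or.inr (Or.inr (Or.inr (Or.inr (Or.inl ⟨congrArg Prod.fst he, congrArg Prod.snd he⟩))))))
    rcases List.mem_cons.mp h with he | h
    · exact Or.inr (Or.inr (Or.inr (Or.inr (Or.inr (Or.inr (Or.inr (Or.inl ⟨congrArg Prod.fst he, congrArg Prod.snd he⟩)))))))
    rcases List.mem_cons.mp h with he | h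
    · exact Or.inr (Or.inr (Or.inr (Or.inr (Or.inr (Or.inr (Or.inr (Or.inr (Or.inl ⟨congrArg Prod.fst he, congrArg Prod.snd he⟩))))))))
    rcases List.mem_cons.mp h with he | h
    · exact Or.inr (Or.inr (Or.inr (Or.inr (Or.inr (Or.inr (Or.inr (Or.inr (Or.inr (Or.inl ⟨congrArg Prod.fst he, congrArg Prod.snd he⟩)))))))))
    rcases List.mem_cons.mp h with he | h
    · exact Or.inr (Or.inr (Or.inr (Or.inr (Or.inr (Or.inr (Or.inr (Or.inr (Or.inr (Or.inr (Or.inl ⟨congrArg Prod.fst he, congrArg Prod.snd he⟩))))))))))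
    rcases List.mem_cons.mp h with he | h
    · exact Or.inr (Or.inr (Or.inr (Or.inr (Or.inr (Or.inr (Or.inr (Or.inr (Or.inr (Or.inr (Or.inr (Or.inl ⟨congrArg Prod.fst he, congrArg Prod.snd he⟩)))))))))))
    exact absurd h (List.not_mem_nil)

lemma pvRankFn_pair (s : String) :
    pvRankFn s = (pvLabelOf (pvRankFn s).2, (pvRankFn s).2) := by
  rcases pvR_char s with ⟨hs, hR⟩|⟨hs, hR⟩|⟨hs, hR⟩|⟨hs, hR⟩|⟨hs, hR⟩|⟨hs, hR⟩|⟨hs, hR⟩|⟨hs, hR⟩|⟨hs, hR⟩|⟨hs, hR⟩|⟨hs, hR⟩|⟨hs, hR⟩|hR <;> rw [hR] <;> rfl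

lemma pvRank_inv0 (s : String) (h0 : (pvRankFn s).2 = 0) : s = "indexed" ∨ s = "parsed" := by
  rcases pvR_char s with ⟨hs, hR⟩|⟨hs, hR⟩|⟨hs, hR⟩|⟨hs, hR⟩|⟨hs, hR⟩|⟨hs, hR⟩|⟨hs, hR⟩|⟨hs, hR⟩|⟨hs, hR⟩|⟨hs, hR⟩|⟨hs, hR⟩|⟨hs, hR⟩|hR
  · exact Or.inl hs
  · exact Or.inr hs
  · rw [hR] at h0; exact absurd h0 (by decide)
  · rw [hR] at h0; exact absurd h0 (by decide)
  · rw [hR] at h0; exact absurd h0 (by decide)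
  · rw [hR] at h0; exact absurd h0 (by decide)
  · rw [hR] at h0; exact absurd h0 (by decide)
  · rw [hR] at h0; exact absurd h0 (by decide)
  · rw [hR] at h0; exact absurd h0 (by decide)
  · rw [hR] at h0; exact absurd h0 (by decide)
  · rw [hR] at h0; exact absurd h0 (by decide)
  · rw [hR] at h0; exact absurd h0 (by decide)
  · rw [hR] at h0; exact absurd h0 (by decide)

lemma pvRank_inv9 (s : String) (h9 : (pvRankFn s).2 = 9) : s = "rendered" ∨ s = "created" := by
  rcases pvR_char s with ⟨hs, hR⟩|⟨hs, hR⟩|⟨hs, hR⟩|⟨hs, hR⟩|⟨hs, hR⟩|⟨hs, hR⟩|⟨hs, hR⟩|⟨hs, hR⟩|⟨hs, hR⟩|⟨hs, hR⟩|⟨hs, hR⟩|⟨hs, hR⟩|hR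
  · rw [hR] at h9; exact absurd h9 (by decide)
  · rw [hR] at h9; exact absurd h9 (by decide)
  · rw [hR] at h9; exact absurd h9 (by decide)
  · rw [hR] at h9; exact absurd h9 (by decide)
  · rw [hR] at h9; exact absurd h9 (by decide)
  · rw [hR] at h9; exact absurd h9 (by decide)
  · rw [hR] at h9; exact absurd h9 (by decide)
  · rw [hR] at h9; exact absurd h9 (by decide)
  · rw [hR] at h9; exact absurd h9 (by decide)
  · rw [hR] at h9; exact absurd h9 (by decide)
  · exact Or.inl hs
  · exact Or.inr hs
  · rw [hR] at h9; exact absurd h9 (by decide)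

lemma pvRank_invFail (s : String) (v : Nat) (h1 : 1 ≤ v) (h8 : v ≤ 8)
    (hrank : (pvRankFn s).2 = v) : s = pvLabelOf v := by
  rcases pvR_char s with ⟨hs, hR⟩|⟨hs, hR⟩|⟨hs, hR⟩|⟨hs, hR⟩|⟨hs, hR⟩|⟨hs, hR⟩|⟨hs, hR⟩|⟨hs, hR⟩|⟨hs, hR⟩|⟨hs, hR⟩|⟨hs, hR⟩|⟨hs, hR⟩|hR
  · rw [hR] at hrank
    have hv : (0 : Nat) = v := hrank
    omega
  · rw [hR] at hrank
    have hv : (0 : Nat) = v := hrank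
    omega
  · rw [hR] at hrank
    have hv : (1 : Nat) = v := hrank
    subst hv
    rw [hs]
    rfl
  · rw [hR] at hrank
    have hv : (2 : Nat) = v := hrank
    subst hv
    rw [hs]
    rfl
  · rw [hR] at hrank
    have hv : (3 : Nat) = v := hrank
    subst hv
    rw [hs]
    rfl
  · rw [hR] at hrank
    have hv : (4 : Nat) = v := hrank
    subst hv
    rw [hs]
    rfl
  · rw [hR] at hrank
    have hv : (5 : Nat) = v := hrank
    subst hv
    rw [hs]
    rfl
  · rw [hR] at hrank
    have hv : (6 : Nat) = v := hrank
    subst hv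
    rw [hs]
    rfl
  · rw [hR] at hrank
    have hv : (7 : Nat) = v := hrank
    subst hv
    rw [hs]
    rfl
  · rw [hR] at hrank
    have hv : (8 : Nat) = v := hrank
    subst hv
    rw [hs]
    rfl
  · rw [hR] at hrank
    have hv : (9 : Nat) = v := hrank
    omega
  · rw [hR] at hrank
    have hv : (9 : Nat) = v := hrank
    omega
  · rw [hR] at hrank
    have hv : (10 : Nat) = v := hrank
    omega

lemma pvRank_memFail (s : String) (h1 : 1 ≤ (pvRankFn s).2) (h8 : (pvRankFn s).2 ≤ 8) :
    s ∈ (pvFailureStatuses : List String) := by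
  rcases pvR_char s with ⟨hs, hR⟩|⟨hs, hR⟩|⟨hs, hR⟩|⟨hs, hR⟩|⟨hs, hR⟩|⟨hs, hR⟩|⟨hs, hR⟩|⟨hs, hR⟩|⟨hs, hR⟩|⟨hs, hR⟩|⟨hs, hR⟩|⟨hs, hR⟩|hR
  · rw [hR] at h1; exact absurd h1 (by decide)
  · rw [hR] at h1; exact absurd h1 (by decide)
  · rw [hs]; decide
  · rw [hs]; decide
  · rw [hs]; decide
  · rw [hs]; decide
  · rw [hs]; decide
  · rw [hs]; decide
  · rw [hs]; decide
  · rw [hs]; decide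
  · rw [hR] at h8; exact absurd h8 (by decide)
  · rw [hR] at h8; exact absurd h8 (by decide)
  · rw [hR] at h8; exact absurd h8 (by decide)

-- running minimum of ranks, initial value k
def pvMinR (l : List String) (k : Nat) : Nat :=
  l.foldl (fun a s => if (pvRankFn s).2 < a then (pvRankFn s).2 else a) k

lemma pvMinR_cons (a : String) (t : List String) (k : Nat) :
    pvMinR (a :: t) k = pvMinR t (if (pvRankFn a).2 < k then (pvRankFn a).2 else k) := rfl

lemma pvMinR_le (l : List String) (k : Nat) : pvMinR l k ≤ k := by
  induction l generalizing k with
  | nil => exact le_refl k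
  | cons a t ih =>
      rw [pvMinR_cons]
      by_cases hc : (pvRankFn a).2 < k
      · rw [if_pos hc]; exact le_trans (ih _) (le_of_lt hc)
      · rw [if_neg hc]; exact ih k

lemma pvMinR_le_mem (l : List String) (k : Nat) (s : String) (hs : s ∈ l) :
    pvMinR l k ≤ (pvRankFn s).2 := by
  induction l generalizing k with
  | nil => cases hs
  | cons a t ih =>
      rw [pvMinR_cons]
      rcases List.mem_cons.mp hs with h | h
      · subst h
        by_cases hc : (pvRankFn s).2 < k
        · rw [if_pos hc]; exact pvMinR_le t _
        · rw [if_neg hc]; exact le_trans (pvMinR_le t k) (by omega)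
      · exact ih _ h

lemma pvMinR_attained (l : List String) (k : Nat) :
    pvMinR l k = k ∨ ∃ s ∈ l, (pvRankFn s).2 = pvMinR l k := by
  induction l generalizing k with
  | nil => exact Or.inl rfl
  | cons a t ih =>
      rw [pvMinR_cons]
      rcases ih (if (pvRankFn a).2 < k then (pvRankFn a).2 else k) with h | ⟨s, hs, hr⟩
      · by_cases hc : (pvRankFn a).2 < k
        · right
          refine ⟨a, List.mem_cons_self .., ?_⟩
          rw [h, if_pos hc]
        · left
          rw [h, if_neg hc]
      · right; exact ⟨s, List.mem_cons_of_mem _ hs, hr⟩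

lemma pvFoldB (l : List String) (k : Nat) :
    l.foldl (fun (b : String × Nat) s =>
        if (pvRankFn s).2 < b.2 then pvRankFn s else b) (pvLabelOf k, k)
      = (pvLabelOf (pvMinR l k), pvMinR l k) := by
  induction l generalizing k with
  | nil => rfl
  | cons a t ih =>
      rw [List.foldl_cons, pvMinR_cons]
      by_cases hc : (pvRankFn a).2 < k
      · rw [if_pos hc, if_pos hc, pvRankFn_pair a, ih]
      · rw [if_neg hc, if_neg hc, ih]

lemma pv_mem_statuses (docs : List (List (String × String))) (x : String) :
    x ∈ pvStatuses docs ↔ x ∈ docs.map pvSt := by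
  unfold pvStatuses pvSt
  exact PySem.Set.mem_ofList _ x

lemma pv_contains_true (docs : List (List (String × String))) (x : String)
    (h : x ∈ docs.map pvSt) : PySem.Set.contains (pvStatuses docs) x = true :=
  (PySem.Set.contains_iff (pvStatuses docs) x).mpr ((pv_mem_statuses docs x).mpr h)

lemma pv_contains_false (docs : List (List (String × String))) (x : String)
    (h : x ∉ docs.map pvSt) : PySem.Set.contains (pvStatuses docs) x = false := by
  cases hb : PySem.Set.contains (pvStatuses docs) x with
  | false => rfl
  | true =>
      exact absurd ((pv_mem_statuses docs x).mp
        ((PySem.Set.contains_iff (pvStatuses docs) x).mp hb)) h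

lemma pv_not_contains (docs : List (List (String × String))) (x : String)
    (h : x ∉ docs.map pvSt) : ¬ (PySem.Set.contains (pvStatuses docs) x = true) :=
  fun hc => h ((pv_mem_statuses docs x).mp ((PySem.Set.contains_iff (pvStatuses docs) x).mp hc))

lemma pv_inter_idx_iff (docs : List (List (String × String))) :
    PySem.Set.inter (pvStatuses docs) pvIndexedStatuses ≠ [] ↔
      ∃ s ∈ docs.map pvSt, (pvRankFn s).2 = 0 := by
  constructor
  · intro h
    obtain ⟨x, hx⟩ := List.exists_mem_of_ne_nil _ h
    rw [PySem.Set.mem_inter] at hx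
    refine ⟨x, (pv_mem_statuses docs x).mp hx.1, ?_⟩
    have hx2 := hx.2
    unfold pvIndexedStatuses at hx2
    rw [PySem.Set.mem_ofList] at hx2
    simp only [List.mem_cons, List.not_mem_nil, or_false] at hx2
    rcases hx2 with h | h <;> subst h <;> decide
  · rintro ⟨s, hs, hr⟩
    apply List.ne_nil_of_mem (a := s)
    rw [PySem.Set.mem_inter]
    refine ⟨(pv_mem_statuses docs s).mpr hs, ?_⟩
    rcases pvRank_inv0 s hr with h | h <;> subst h <;> decide

lemma pv_inter_fail_iff (docs : List (List (String × String))) :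
    PySem.Set.inter (pvStatuses docs) pvFailureStatuses ≠ [] ↔
      ∃ s ∈ docs.map pvSt, 1 ≤ (pvRankFn s).2 ∧ (pvRankFn s).2 ≤ 8 := by
  constructor
  · intro h
    obtain ⟨x, hx⟩ := List.exists_mem_of_ne_nil _ h
    rw [PySem.Set.mem_inter] at hx
    refine ⟨x, (pv_mem_statuses docs x).mp hx.1, ?_⟩
    have hx2 := hx.2
    unfold pvFailureStatuses at hx2
    rw [PySem.Set.mem_ofList] at hx2
    simp only [List.mem_cons, List.not_mem_nil, or_false] at hx2
    rcases hx2 with h | h | h | h | h | h | h | h <;> subst h <;> decide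
  · rintro ⟨s, hs, h1, h8⟩
    apply List.ne_nil_of_mem (a := s)
    rw [PySem.Set.mem_inter]
    exact ⟨(pv_mem_statuses docs s).mpr hs, pvRank_memFail s h1 h8⟩

-- B after the empty-docs guard computes pvLabelOf of the minimum rank
lemma pv_alt_eq (docs : List (List (String × String))) (h : docs ≠ []) :
    source_status_py_alt docs = pvLabelOf (pvMinR (docs.map pvSt) 10) := by
  unfold source_status_py_alt
  rw [if_neg h]
  have hfold :
      (docs.foldl
        (fun (best : String × Nat) d =>
          let entry := pvRankTable.getD ((PySem.Dict.mk d).getD "status" "unknown") ("unknown", 10)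
          if entry.2 < best.2 then entry else best)
        ("unknown", 10))
      = (docs.map pvSt).foldl
          (fun (b : String × Nat) s => if (pvRankFn s).2 < b.2 then pvRankFn s else b)
          ("unknown", 10) := by
    rw [List.foldl_map]
    rfl
  rw [hfold]
  have h10 : (("unknown", (10 : Nat)) : String × Nat) = (pvLabelOf 10, 10) := rfl
  rw [h10, pvFoldB]

-- A after the empty-docs guard computes the same value
lemma pv_core (docs : List (List (String × String))) :
    (if PySem.Set.inter (pvStatuses docs) pvIndexedStatuses ≠ [] then "ok"
     else
       match (if PySem.Set.inter (pvStatuses docs) pvFailureStatuses ≠ [] then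
                pvFailOrder.find? (fun s => PySem.Set.contains (pvStatuses docs) s)
              else none) with
       | some s => s
       | none =>
           if PySem.Set.contains (pvStatuses docs) "rendered"
              || PySem.Set.contains (pvStatuses docs) "created"
           then "in_progress" else "unknown")
    = pvLabelOf (pvMinR (docs.map pvSt) 10) := by
  have hm10 := pvMinR_le (docs.map pvSt) 10
  have hle := fun s hs => pvMinR_le_mem (docs.map pvSt) 10 s hs
  have hatt := pvMinR_attained (docs.map pvSt) 10
  obtain ⟨m, hM⟩ : ∃ m, pvMinR (docs.map pvSt) 10 = m := ⟨_, rfl⟩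
  rw [hM] at hm10 hle hatt ⊢
  have hnotmem : ∀ x : String, (pvRankFn x).2 < m → x ∉ docs.map pvSt := by
    intro x hx hmem
    exact absurd (hle x hmem) (by omega)
  have hidxF : 1 ≤ m → ¬ PySem.Set.inter (pvStatuses docs) pvIndexedStatuses ≠ [] := by
    intro h1 hc
    obtain ⟨t, ht, hr0⟩ := (pv_inter_idx_iff docs).mp hc
    have := hle t ht
    omega
  have hfailF : 9 ≤ m → ¬ PySem.Set.inter (pvStatuses docs) pvFailureStatuses ≠ [] := by
    intro h9 hc
    obtain ⟨t, ht, ht1, ht8⟩ := (pv_inter_fail_iff docs).mp hc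
    have := hle t ht
    omega
  interval_cases m
  · -- m = 0
    rcases hatt with h | ⟨s, hs, hr⟩
    · omega
    · rw [if_pos ((pv_inter_idx_iff docs).mpr ⟨s, hs, hr⟩)]
      rfl
  · -- m = 1
    rcases hatt with h | ⟨s, hs, hr⟩
    · omega
    · have hkey := pvRank_invFail s 1 (by omega) (by omega) hr
      rw [hkey] at hs
      have hs2 : ("blocked_paywall" : String) ∈ docs.map pvSt := hs
      have hfind : pvFailOrder.find? (fun s => PySem.Set.contains (pvStatuses docs) s)
          = some "blocked_paywall" := by
        unfold pvFailOrder
        exact List.find?_cons_of_pos (pv_contains_true docs "blocked_paywall" hs2)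
      rw [if_neg (hidxF (by omega)),
          if_pos ((pv_inter_fail_iff docs).mpr ⟨"blocked_paywall", hs2, by decide, by decide⟩),
          hfind]
      rfl
  · -- m = 2
    rcases hatt with h | ⟨s, hs, hr⟩
    · omega
    · have hkey := pvRank_invFail s 2 (by omega) (by omega) hr
      rw [hkey] at hs
      have hs2 : ("captcha" : String) ∈ docs.map pvSt := hs
      have hfind : pvFailOrder.find? (fun s => PySem.Set.contains (pvStatuses docs) s)
          = some "captcha" := by
        unfold pvFailOrder
        rw [List.find?_cons_of_neg (pv_not_contains docs "blocked_paywall" (hnotmem "blocked_paywall" (by decide)))]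
        exact List.find?_cons_of_pos (pv_contains_true docs "captcha" hs2)
      rw [if_neg (hidxF (by omega)),
          if_pos ((pv_inter_fail_iff docs).mpr ⟨"captcha", hs2, by decide, by decide⟩),
          hfind]
      rfl
  · -- m = 3
    rcases hatt with h | ⟨s, hs, hr⟩
    · omega
    · have hkey := pvRank_invFail s 3 (by omega) (by omega) hr
      rw [hkey] at hs
      have hs2 : ("forbidden_403" : String) ∈ docs.map pvSt := hs
      have hfind : pvFailOrder.find? (fun s => PySem.Set.contains (pvStatuses docs) s)
          = some "forbidden_403" := by
        unfold pvFailOrder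
        rw [List.find?_cons_of_neg (pv_not_contains docs "blocked_paywall" (hnotmem "blocked_paywall" (by decide)))]
        rw [List.find?_cons_of_neg (pv_not_contains docs "captcha" (hnotmem "captcha" (by decide)))]
        exact List.find?_cons_of_pos (pv_contains_true docs "forbidden_403" hs2)
      rw [if_neg (hidxF (by omega)),
          if_pos ((pv_inter_fail_iff docs).mpr ⟨"forbidden_403", hs2, by decide, by decide⟩),
          hfind]
      rfl
  · -- m = 4
    rcases hatt with h | ⟨s, hs, hr⟩
    · omega
    · have hkey := pvRank_invFail s 4 (by omega) (by omega) hr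
      rw [hkey] at hs
      have hs2 : ("rate_limited_429" : String) ∈ docs.map pvSt := hs
      have hfind : pvFailOrder.find? (fun s => PySem.Set.contains (pvStatuses docs) s)
          = some "rate_limited_429" := by
        unfold pvFailOrder
        rw [List.find?_cons_of_neg (pv_not_contains docs "blocked_paywall" (hnotmem "blocked_paywall" (by decide)))]
        rw [List.find?_cons_of_neg (pv_not_contains docs "captcha" (hnotmem "captcha" (by decide)))]
        rw [List.find?_cons_of_neg (pv_not_contains docs "forbidden_403" (hnotmem "forbidden_403" (by decide)))]
        exact List.find?_cons_of_pos (pv_contains_true docs "rate_limited_429" hs2)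
      rw [if_neg (hidxF (by omega)),
          if_pos ((pv_inter_fail_iff docs).mpr ⟨"rate_limited_429", hs2, by decide, by decide⟩),
          hfind]
      rfl
  · -- m = 5
    rcases hatt with h | ⟨s, hs, hr⟩
    · omega
    · have hkey := pvRank_invFail s 5 (by omega) (by omega) hr
      rw [hkey] at hs
      have hs2 : ("requires_login" : String) ∈ docs.map pvSt := hs
      have hfind : pvFailOrder.find? (fun s => PySem.Set.contains (pvStatuses docs) s)
          = some "requires_login" := by
        unfold pvFailOrder
        rw [List.find?_cons_of_neg (pv_not_contains docs "blocked_paywall" (hnotmem "blocked_paywall" (by decide)))]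
        rw [List.find?_cons_of_neg (pv_not_contains docs "captcha" (hnotmem "captcha" (by decide)))]
        rw [List.find?_cons_of_neg (pv_not_contains docs "forbidden_403" (hnotmem "forbidden_403" (by decide)))]
        rw [List.find?_cons_of_neg (pv_not_contains docs "rate_limited_429" (hnotmem "rate_limited_429" (by decide)))]
        exact List.find?_cons_of_pos (pv_contains_true docs "requires_login" hs2)
      rw [if_neg (hidxF (by omega)),
          if_pos ((pv_inter_fail_iff docs).mpr ⟨"requires_login", hs2, by decide, by decide⟩),
          hfind]
      rfl
  · -- m = 6
    rcases hatt with h | ⟨s, hs, hr⟩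
    · omega
    · have hkey := pvRank_invFail s 6 (by omega) (by omega) hr
      rw [hkey] at hs
      have hs2 : ("robots_denied" : String) ∈ docs.map pvSt := hs
      have hfind : pvFailOrder.find? (fun s => PySem.Set.contains (pvStatuses docs) s)
          = some "robots_denied" := by
        unfold pvFailOrder
        rw [List.find?_cons_of_neg (pv_not_contains docs "blocked_paywall" (hnotmem "blocked_paywall" (by decide)))]
        rw [List.find?_cons_of_neg (pv_not_contains docs "captcha" (hnotmem "captcha" (by decide)))]
        rw [List.find?_cons_of_neg (pv_not_contains docs "forbidden_403" (hnotmem "forbidden_403" (by decide)))]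
        rw [List.find?_cons_of_neg (pv_not_contains docs "rate_limited_429" (hnotmem "rate_limited_429" (by decide)))]
        rw [List.find?_cons_of_neg (pv_not_contains docs "requires_login" (hnotmem "requires_login" (by decide)))]
        exact List.find?_cons_of_pos (pv_contains_true docs "robots_denied" hs2)
      rw [if_neg (hidxF (by omega)),
          if_pos ((pv_inter_fail_iff docs).mpr ⟨"robots_denied", hs2, by decide, by decide⟩),
          hfind]
      rfl
  · -- m = 7
    rcases hatt with h | ⟨s, hs, hr⟩
    · omega
    · have hkey := pvRank_invFail s 7 (by omega) (by omega) hr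
      rw [hkey] at hs
      have hs2 : ("timeout" : String) ∈ docs.map pvSt := hs
      have hfind : pvFailOrder.find? (fun s => PySem.Set.contains (pvStatuses docs) s)
          = some "timeout" := by
        unfold pvFailOrder
        rw [List.find?_cons_of_neg (pv_not_contains docs "blocked_paywall" (hnotmem "blocked_paywall" (by decide)))]
        rw [List.find?_cons_of_neg (pv_not_contains docs "captcha" (hnotmem "captcha" (by decide)))]
        rw [List.find?_cons_of_neg (pv_not_contains docs "forbidden_403" (hnotmem "forbidden_403" (by decide)))]
        rw [List.find?_cons_of_neg (pv_not_contains docs "rate_limited_429" (hnotmem "rate_limited_429" (by decide)))]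
        rw [List.find?_cons_of_neg (pv_not_contains docs "requires_login" (hnotmem "requires_login" (by decide)))]
        rw [List.find?_cons_of_neg (pv_not_contains docs "robots_denied" (hnotmem "robots_denied" (by decide)))]
        exact List.find?_cons_of_pos (pv_contains_true docs "timeout" hs2)
      rw [if_neg (hidxF (by omega)),
          if_pos ((pv_inter_fail_iff docs).mpr ⟨"timeout", hs2, by decide, by decide⟩),
          hfind]
      rfl
  · -- m = 8
    rcases hatt with h | ⟨s, hs, hr⟩
    · omega
    · have hkey := pvRank_invFail s 8 (by omega) (by omega) hr
      rw [hkey] at hs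
      have hs2 : ("failed" : String) ∈ docs.map pvSt := hs
      have hfind : pvFailOrder.find? (fun s => PySem.Set.contains (pvStatuses docs) s)
          = some "failed" := by
        unfold pvFailOrder
        rw [List.find?_cons_of_neg (pv_not_contains docs "blocked_paywall" (hnotmem "blocked_paywall" (by decide)))]
        rw [List.find?_cons_of_neg (pv_not_contains docs "captcha" (hnotmem "captcha" (by decide)))]
        rw [List.find?_cons_of_neg (pv_not_contains docs "forbidden_403" (hnotmem "forbidden_403" (by decide)))]
        rw [List.find?_cons_of_neg (pv_not_contains docs "rate_limited_429" (hnotmem "rate_limited_429" (by decide)))]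
        rw [List.find?_cons_of_neg (pv_not_contains docs "requires_login" (hnotmem "requires_login" (by decide)))]
        rw [List.find?_cons_of_neg (pv_not_contains docs "robots_denied" (hnotmem "robots_denied" (by decide)))]
        rw [List.find?_cons_of_neg (pv_not_contains docs "timeout" (hnotmem "timeout" (by decide)))]
        exact List.find?_cons_of_pos (pv_contains_true docs "failed" hs2)
      rw [if_neg (hidxF (by omega)),
          if_pos ((pv_inter_fail_iff docs).mpr ⟨"failed", hs2, by decide, by decide⟩),
          hfind]
      rfl
  · -- m = 9
    rcases hatt with h | ⟨s, hs, hr⟩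
    · omega
    · rw [if_neg (hidxF (by omega)), if_neg (hfailF (by omega))]
      rcases pvRank_inv9 s hr with h | h
      · subst h
        rw [pv_contains_true docs "rendered" hs]
        rfl
      · subst h
        rw [pv_contains_true docs "created" hs, Bool.or_true]
        rfl
  · -- m = 10: no recognised status at all
    rw [if_neg (hidxF (by omega)), if_neg (hfailF (by omega)),
        pv_contains_false docs "rendered" (hnotmem "rendered" (by decide)),
        pv_contains_false docs "created" (hnotmem "created" (by decide))]
    rfl

-- ===== VERDICT (by name: the statement is the Claim_ definition above) =====
theorem source_status_py_spec : Claim_equal_source_status_py := by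
  intro docs _
  unfold Spec_source_status_py
  cases docs with
  | nil => rfl
  | cons d t =>
      rw [pv_alt_eq (d :: t) (List.cons_ne_nil d t)]
      unfold source_status_py
      rw [if_neg (List.cons_ne_nil d t)]
      exact pv_core (d :: t)
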